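-- pv_equiv track=rewrite | github.com/suriya-3108/60-DAYS-STRONG-IN-DSA | WEEK-5/DAY-30/QUESTION-3.py | solution
-- ===== SOURCE A (Python) =====
-- def solution(arr):
--     stack = []
--     result = [0] * len(arr)
--
--     for i in range(len(arr)):
--         while stack and arr[i] > arr[stack[-1]]:
--             prev_day = stack.pop()
--             result[prev_day] = i - prev_day
--         stack.append(i)
--
--     return result
-- ===== SOURCE B (Python) =====
-- def solution(arr):
--     n = len(arr)
--     return [next((j - i for j in range(i + 1, n) if arr[j] > arr[i]), 0)
--             for i in range(n)]
-- ===== Notes on version B (the rewrite author's own statement) =====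
-- stated objective: simpler
-- what changed: Replaced the monotonic index stack with a direct per-element forward scan: for each i, the distance to the first later strictly greater element (0 if none), written as a single comprehension.
import Mathlib
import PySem

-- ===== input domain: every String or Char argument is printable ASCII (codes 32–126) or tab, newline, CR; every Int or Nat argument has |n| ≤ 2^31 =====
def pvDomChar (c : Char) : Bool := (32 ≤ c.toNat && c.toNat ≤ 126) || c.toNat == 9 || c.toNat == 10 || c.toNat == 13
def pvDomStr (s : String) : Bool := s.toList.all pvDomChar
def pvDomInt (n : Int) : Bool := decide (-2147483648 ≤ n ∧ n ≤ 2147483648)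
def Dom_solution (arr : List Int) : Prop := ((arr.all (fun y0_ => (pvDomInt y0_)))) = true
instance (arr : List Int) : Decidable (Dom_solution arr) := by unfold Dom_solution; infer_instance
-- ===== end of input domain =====

-- B replaces A's monotonic index stack by a direct per-element forward scan (simpler, not faster).

-- ===== PORT A =====
-- the inner `while stack and arr[i] > arr[stack[-1]]` loop (stack top = list head)
def pvPop (arr : List Int) (i : Nat) : List Nat → List Int → List Nat × List Int
  | [], res => ([], res)
  | p :: st, res =>
    if arr.getD p 0 < arr.getD i 0 then
      pvPop arr i st (res.set p ((i : Int) - (p : Int)))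
    else (p :: st, res)

-- one iteration of the `for i in range(len(arr))` loop
def pvStep (arr : List Int) (s : List Nat × List Int) (i : Nat) : List Nat × List Int :=
  let t := pvPop arr i s.1 s.2
  (i :: t.1, t.2)

def solution (arr : List Int) : List Int :=
  ((List.range arr.length).foldl (pvStep arr) ([], List.replicate arr.length 0)).2

-- ===== PORT B =====
-- next((j - i for j in range(i + 1, n) if arr[j] > arr[i]), 0)
def pvNge (arr : List Int) (i : Nat) : Int :=
  match (List.range' (i + 1) (arr.length - (i + 1))).find?
      (fun j => arr.getD i 0 < arr.getD j 0) with
  | some j => (j : Int) - (i : Int)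
  | none => 0

def solution_alt (arr : List Int) : List Int :=
  (List.range arr.length).map (pvNge arr)

-- ===== PRECONDITION & SPEC =====
def Spec_solution (arr : List Int) (out : List Int) : Prop := out = solution_alt arr
instance (arr : List Int) (out : List Int) : Decidable (Spec_solution arr out) := by unfold Spec_solution; infer_instance

-- ===== CLAIM (what is proved, stated in full; the proofs are below) =====
def Claim_equal_solution : Prop := ∀ (arr : List Int), Dom_solution arr → Spec_solution arr (solution arr)

-- ===== LEMMAS AND PROOFS =====

-- p has no strictly greater element among indices p+1 .. k-1
def pvKeep (arr : List Int) (k p : Nat) : Prop :=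
  p < k ∧ ∀ j, p < j → j < k → arr.getD j 0 ≤ arr.getD p 0

lemma pv_find?_range'_some (f : Nat → Bool) (j : Nat) :
    ∀ (s len : Nat), s ≤ j → j < s + len → (∀ t, s ≤ t → t < j → f t = false) → f j = true →
    (List.range' s len).find? f = some j := by
  intro s len
  induction len generalizing s with
  | zero => intro h1 h2; omega
  | succ n ih =>
    intro h1 h2 h3 h4
    rw [List.range'_succ]
    by_cases hs : s = j
    · subst hs; rw [List.find?_cons_of_pos h4]
    · rw [List.find?_cons_of_neg (by simp [h3 s le_rfl (by omega)])]
      exact ih (s + 1) (by omega) (by omega) (fun t ht1 ht2 => h3 t (by omega) ht2) h4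

lemma pvNge_eq (arr : List Int) (k p : Nat) (hk : k < arr.length)
    (hKeep : pvKeep arr k p) (hlt : arr.getD p 0 < arr.getD k 0) :
    pvNge arr p = (k : Int) - (p : Int) := by
  obtain ⟨hpk, hkeep⟩ := hKeep
  unfold pvNge
  rw [pv_find?_range'_some (fun j => decide (arr.getD p 0 < arr.getD j 0)) k (p + 1)
      (arr.length - (p + 1)) (by omega) (by omega)
      (fun t ht1 ht2 => decide_eq_false (not_lt.mpr (hkeep t (by omega) (by omega))))
      (decide_eq_true hlt)]

lemma pvNge_zero (arr : List Int) (p : Nat) (hKeep : pvKeep arr arr.length p) :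
    pvNge arr p = 0 := by
  unfold pvNge
  rw [List.find?_eq_none.mpr ?_]
  intro j hj
  rw [List.mem_range'_1] at hj
  exact fun h => absurd (of_decide_eq_true h) (not_lt.mpr (hKeep.2 j (by omega) (by omega)))

def pvInv (arr : List Int) (k : Nat) (s : List Nat × List Int) : Prop :=
  s.2.length = arr.length ∧
  s.1.Pairwise (fun a b => b < a) ∧
  (∀ p, p ∈ s.1 ↔ pvKeep arr k p) ∧
  (∀ p, p < arr.length →
    s.2.getD p 0 = if p ∈ s.1 then 0 else if p < k then pvNge arr p else 0)

lemma pvPop_spec (arr : List Int) (k : Nat) (hk : k < arr.length) :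
    ∀ (st : List Nat) (res : List Int),
    res.length = arr.length →
    st.Pairwise (fun a b => b < a) →
    (∀ p ∈ st, pvKeep arr k p) →
    (∀ p, p < arr.length →
      res.getD p 0 = if p ∈ st then 0 else if p < k then pvNge arr p else 0) →
    (pvPop arr k st res).2.length = arr.length ∧
    (pvPop arr k st res).1.Pairwise (fun a b => b < a) ∧
    (∀ p, p ∈ (pvPop arr k st res).1 ↔ (p ∈ st ∧ arr.getD k 0 ≤ arr.getD p 0)) ∧
    (∀ p, p < arr.length →
      (pvPop arr k st res).2.getD p 0 =
        if p ∈ (pvPop arr k st res).1 then 0 else if p < k then pvNge arr p else 0) := by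
  intro st
  induction st with
  | nil =>
    intro res h1 h2 h3 h4
    refine ⟨h1, by simp [pvPop], by simp [pvPop], ?_⟩
    intro p hp; simpa [pvPop] using h4 p hp
  | cons q st ih =>
    intro res h1 h2 h3 h4
    by_cases hq : arr.getD q 0 < arr.getD k 0
    · -- pop q
      have hqk : pvKeep arr k q := h3 q (by simp)
      have hqlt : q < k := hqk.1
      have hqn : q < arr.length := by omega
      have hqnot : q ∉ st := by
        intro hmem
        have := (List.pairwise_cons.mp h2).1 q hmem
        omega
      have hlen2 : (res.set q ((k : Int) - (q : Int))).length = arr.length := by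
        simp [h1]
      have hres2 : ∀ p, p < arr.length →
          (res.set q ((k : Int) - (q : Int))).getD p 0 =
            if p ∈ st then 0 else if p < k then pvNge arr p else 0 := by
        intro p hp
        by_cases hpq : p = q
        · subst hpq
          rw [List.getD_eq_getElem _ _ (by omega), List.getElem_set_self (by omega)]
          rw [if_neg hqnot, if_pos hqlt, pvNge_eq arr k p hk hqk hq]
        · rw [List.getD_eq_getElem _ _ (by omega),
            List.getElem_set_ne (fun h => hpq h.symm),
            ← List.getD_eq_getElem _ _ (by omega)]
          have := h4 p hp
          simp [hpq] at this
          exact this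
      have h := ih (res.set q ((k : Int) - (q : Int))) hlen2
        (List.pairwise_cons.mp h2).2 (fun p hp => h3 p (by simp [hp])) hres2
      have hstep : pvPop arr k (q :: st) res =
          pvPop arr k st (res.set q ((k : Int) - (q : Int))) := by
        simp only [pvPop]
        rw [if_pos hq]
      rw [hstep]
      refine ⟨h.1, h.2.1, ?_, h.2.2.2⟩
      intro p
      rw [h.2.2.1 p]
      constructor
      · rintro ⟨hp1, hp2⟩; exact ⟨by simp [hp1], hp2⟩
      · rintro ⟨hp1, hp2⟩
        rcases List.mem_cons.mp hp1 with h' | h'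
        · subst h'; omega
        · exact ⟨h', hp2⟩
    · -- stop: stack unchanged
      have hstep : pvPop arr k (q :: st) res = (q :: st, res) := by
        simp only [pvPop]
        rw [if_neg hq]
      rw [hstep]
      have hall : ∀ p ∈ q :: st, arr.getD k 0 ≤ arr.getD p 0 := by
        intro p hp
        rcases List.mem_cons.mp hp with h' | h'
        · subst h'; omega
        · have hpq : p < q := (List.pairwise_cons.mp h2).1 p h'
          have hpk : pvKeep arr k p := h3 p (by simp [h'])
          have : arr.getD q 0 ≤ arr.getD p 0 :=
            hpk.2 q (by omega) (h3 q (by simp)).1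
          omega
      exact ⟨h1, h2, fun p => ⟨fun hp => ⟨hp, hall p hp⟩, fun hp => hp.1⟩, h4⟩

lemma pvStep_inv (arr : List Int) (k : Nat) (hk : k < arr.length)
    (s : List Nat × List Int) (hs : pvInv arr k s) :
    pvInv arr (k + 1) (pvStep arr s k) := by
  obtain ⟨h1, h2, h3, h4⟩ := hs
  have hmemlt : ∀ p ∈ s.1, p < k := fun p hp => ((h3 p).mp hp).1
  have h := pvPop_spec arr k hk s.1 s.2 h1 h2 (fun p hp => (h3 p).mp hp) h4
  obtain ⟨g1, g2, g3, g4⟩ := h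
  have hsublt : ∀ p ∈ (pvPop arr k s.1 s.2).1, p < k :=
    fun p hp => hmemlt p ((g3 p).mp hp).1
  refine ⟨g1, ?_, ?_, ?_⟩
  · exact List.pairwise_cons.mpr ⟨hsublt, g2⟩
  · intro p
    simp only [pvStep, List.mem_cons]
    constructor
    · rintro (h' | h')
      · subst h'
        exact ⟨by omega, fun j hj1 hj2 => by omega⟩
      · obtain ⟨hp1, hp2⟩ := (g3 p).mp h'
        have hkeep := (h3 p).mp hp1
        have hplt : p < k := hkeep.1
        refine ⟨by omega, fun j hj1 hj2 => ?_⟩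
        by_cases hjk : j = k
        · subst hjk; exact hp2
        · exact hkeep.2 j hj1 (by omega)
    · rintro ⟨hp1, hp2⟩
      by_cases hpk : p = k
      · left; exact hpk
      · right
        have hplt : p < k := by omega
        have hinst : p ∈ s.1 := (h3 p).mpr
          ⟨hplt, fun j hj1 hj2 => hp2 j hj1 (by omega)⟩
        exact (g3 p).mpr ⟨hinst, hp2 k (by omega) (by omega)⟩
  · intro p hp
    have hset := g4 p hp
    show (pvPop arr k s.1 s.2).2.getD p 0 =
      if p ∈ k :: (pvPop arr k s.1 s.2).1 then 0 else if p < k + 1 then pvNge arr p else 0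
    by_cases hmem : p ∈ (pvPop arr k s.1 s.2).1
    · rw [if_pos (List.mem_cons.mpr (Or.inr hmem))]
      rw [if_pos hmem] at hset
      exact hset
    · by_cases hpk : p = k
      · rw [if_pos (List.mem_cons.mpr (Or.inl hpk))]
        rw [if_neg hmem, if_neg (by omega : ¬ p < k)] at hset
        exact hset
      · rw [if_neg (by simp [hpk, hmem])]
        rw [if_neg hmem] at hset
        by_cases h' : p < k
        · rw [if_pos h'] at hset
          rw [if_pos (by omega)]
          exact hset
        · rw [if_neg h'] at hset
          rw [if_neg (by omega)]
          exact hset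

lemma pvMain (arr : List Int) :
    ∀ k, k ≤ arr.length →
    pvInv arr k ((List.range k).foldl (pvStep arr) ([], List.replicate arr.length 0)) := by
  intro k
  induction k with
  | zero =>
    intro _
    refine ⟨by simp, by simp, ?_, ?_⟩
    · intro p; simp [pvKeep]
    · intro p hp; simp
  | succ k ih =>
    intro hk
    rw [List.range_succ, List.foldl_append, List.foldl_cons, List.foldl_nil]
    exact pvStep_inv arr k (by omega) _ (ih (by omega))

-- ===== VERDICT (by name: the statement is the Claim_ definition above) =====
theorem solution_spec : Claim_equal_solution := by
  intro arr _
  unfold Spec_solution solution solution_alt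
  obtain ⟨h1, _, h3, h4⟩ := pvMain arr arr.length le_rfl
  set s := (List.range arr.length).foldl (pvStep arr) ([], List.replicate arr.length 0) with hs
  apply List.ext_getElem (by simp [h1])
  intro p hp1 hp2
  have hpn : p < arr.length := by simpa [h1] using hp1
  have heq : s.2.getD p 0 = pvNge arr p := by
    rw [h4 p hpn]
    by_cases hmem : p ∈ s.1
    · rw [if_pos hmem, pvNge_zero arr p ((h3 p).mp hmem)]
    · rw [if_neg hmem, if_pos hpn]
  rw [List.getD_eq_getElem _ _ hp1] at heq
  rw [heq]
  simp
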